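-- pv_equiv track=rewrite | github.com/abarbieu/eincasm-pytito | test.py | produce_order
-- ===== SOURCE A (Python) =====
-- def produce_order(kernel_len):
--     order = []
--     ind = 0
--     i = 0
--     while i < kernel_len:
--         order.append(ind)
--         if ind > 0:
--             ind = -ind
--         else:
--             ind = (-ind + 1)
--         i += 1
--     return order
-- ===== SOURCE B (Python) =====
-- def produce_order(kernel_len):
--     order = []
--     i = 0
--     while i < kernel_len:
--         order.append((i + 1) // 2 * (1 if i % 2 else -1))
--         i += 1
--     return order
-- ===== Notes on version B (the rewrite author's own statement) =====
-- stated objective: simpler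
-- what changed: Replaces the threaded sign-flip accumulator `ind` by a closed form computed directly from the loop index: element i is ((i+1)//2)*(1 if i%2 else -1), so no per-step state is carried.
import Mathlib
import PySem

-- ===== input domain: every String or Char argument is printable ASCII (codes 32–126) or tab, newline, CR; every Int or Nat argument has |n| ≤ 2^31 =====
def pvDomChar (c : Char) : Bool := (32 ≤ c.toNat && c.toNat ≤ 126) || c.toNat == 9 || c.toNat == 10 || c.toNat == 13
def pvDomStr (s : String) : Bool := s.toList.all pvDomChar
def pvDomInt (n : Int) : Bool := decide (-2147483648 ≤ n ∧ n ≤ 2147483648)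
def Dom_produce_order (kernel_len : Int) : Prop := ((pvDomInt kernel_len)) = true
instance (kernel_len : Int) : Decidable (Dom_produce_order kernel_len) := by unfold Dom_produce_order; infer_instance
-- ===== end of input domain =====

-- B replaces A's threaded sign-flip accumulator by a per-index closed form; objective: simpler.

-- ===== PORT A =====
-- A's while loop: i goes 0,1,… while i < kernel_len, so it runs exactly kernel_len.toNat times;
-- the fuel is that trip count and `ind` is the threaded state, exactly as in A.
def poA_go : Nat → Int → List Int
  | 0, _ => []
  | n + 1, ind => ind :: poA_go n (if ind > 0 then -ind else -ind + 1)

def produce_order (kernel_len : Int) : List Int :=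
  poA_go kernel_len.toNat 0

-- ===== PORT B =====
-- same trip count; each element computed from the index i alone, no threaded state
def poB_go : Nat → Int → List Int
  | 0, _ => []
  | n + 1, i =>
      (PySem.Int.floordiv (i + 1) 2 * (if PySem.Int.mod i 2 ≠ 0 then 1 else -1)) :: poB_go n (i + 1)

def produce_order_alt (kernel_len : Int) : List Int :=
  poB_go kernel_len.toNat 0

-- ===== PRECONDITION & SPEC =====
def Spec_produce_order (kernel_len : Int) (out : List Int) : Prop := out = produce_order_alt kernel_len
instance (kernel_len : Int) (out : List Int) : Decidable (Spec_produce_order kernel_len out) := by unfold Spec_produce_order; infer_instance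

-- ===== CLAIM (what is proved, stated in full; the proofs are below) =====
def Claim_equal_produce_order : Prop := ∀ (kernel_len : Int), Dom_produce_order kernel_len → Spec_produce_order kernel_len (produce_order kernel_len)

-- ===== LEMMAS AND PROOFS =====

-- B's closed form at index i (the head element poB_go emits at counter i)
def poVal (i : Int) : Int :=
  PySem.Int.floordiv (i + 1) 2 * (if PySem.Int.mod i 2 ≠ 0 then 1 else -1)

-- A's state transition sends the closed form at i to the closed form at i+1
theorem poVal_step (i : Int) (h : 0 ≤ i) :
    (if poVal i > 0 then -poVal i else -poVal i + 1) = poVal (i + 1) := by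
  have h2 : (0:Int) < 2 := by norm_num
  unfold poVal
  rw [PySem.Int.floordiv_eq_ediv_of_pos h2, PySem.Int.floordiv_eq_ediv_of_pos h2,
      PySem.Int.mod_eq_emod_of_pos h2, PySem.Int.mod_eq_emod_of_pos h2]
  by_cases hp : i % 2 = 0 <;> simp [hp] <;> split_ifs <;> omega

theorem go_eq (n : Nat) : ∀ (i : Int), 0 ≤ i → poA_go n (poVal i) = poB_go n i := by
  induction n with
  | zero => intro i _; rfl
  | succ m ih =>
      intro i hi
      show (poVal i :: poA_go m _) = (poVal i :: poB_go m (i + 1))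
      rw [poVal_step i hi, ih (i + 1) (by omega)]

theorem poVal_zero : poVal 0 = 0 := by decide

-- ===== VERDICT (by name: the statement is the Claim_ definition above) =====
theorem produce_order_spec : Claim_equal_produce_order := by
  intro k _
  unfold Spec_produce_order produce_order produce_order_alt
  have h := go_eq k.toNat 0 le_rfl
  rw [poVal_zero] at h
  exact h
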